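-- pv_equiv track=rewrite | github.com/RiceDefender/CelebrityProfilingBachelorThesis | Preprocessing/chunking.py | chunk_follower_groups_by_tweets
-- ===== SOURCE A (Python) =====
-- from typing import Any, Dict, List, Optional
--
-- def chunk_follower_groups_by_tweets(
--     follower_groups: List[List[str]],
--     tweets_per_chunk: int = 12,
--     max_followers: Optional[int] = None,
--     max_tweets_per_follower: Optional[int] = None,
-- ) -> List[List[str]]:
--     """
--     Erzeugt Chunks als Listen von Tweets.
--
--     Strategie:
--     - follower_groups = List[List[str]]   -> followers -> tweets
--     - optional follower/tweet limits anwenden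
--     - alle Tweets in eine flache Liste bringen
--     - in Blöcke von tweets_per_chunk aufteilen
--     """
--     selected_followers = follower_groups[:max_followers] if max_followers is not None else follower_groups
--
--     flat_tweets: List[str] = []
--
--     for tweets in selected_followers:
--         selected_tweets = tweets[:max_tweets_per_follower] if max_tweets_per_follower is not None else tweets
--         clean = [t for t in selected_tweets if isinstance(t, str) and t.strip()]
--         flat_tweets.extend(clean)
--
--     chunks: List[List[str]] = []
--     for i in range(0, len(flat_tweets), tweets_per_chunk):
--         chunk = flat_tweets[i:i + tweets_per_chunk]
--         if chunk:
--             chunks.append(chunk)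
--
--     return chunks
-- ===== SOURCE B (Python) =====
-- from typing import List, Optional
--
-- def chunk_follower_groups_by_tweets(
--     follower_groups: List[List[str]],
--     tweets_per_chunk: int = 12,
--     max_followers: Optional[int] = None,
--     max_tweets_per_follower: Optional[int] = None,
-- ) -> List[List[str]]:
--     # Single pass: no intermediate flat list; fill the current chunk as tweets stream by.
--     selected_followers = follower_groups[:max_followers] if max_followers is not None else follower_groups
--     chunks: List[List[str]] = []
--     current: List[str] = []
--     for tweets in selected_followers:
--         selected_tweets = tweets[:max_tweets_per_follower] if max_tweets_per_follower is not None else tweets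
--         for t in selected_tweets:
--             if isinstance(t, str) and t.strip():
--                 current.append(t)
--                 if len(current) == tweets_per_chunk:
--                     chunks.append(current)
--                     current = []
--     if current:
--         chunks.append(current)
--     return chunks
-- ===== Notes on version B (the rewrite author's own statement) =====
-- stated objective: simpler
-- what changed: B drops the intermediate flat tweet list and the index-range chunking pass: it streams tweets once, filling a 'current' chunk that is flushed whenever it reaches tweets_per_chunk, with the leftover appended at the end.
-- outside the precondition, e.g. on chunk_follower_groups_by_tweets([['a', 'b']], -3, None, None): A returns [], B returns [['a', 'b']]
import Mathlib
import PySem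

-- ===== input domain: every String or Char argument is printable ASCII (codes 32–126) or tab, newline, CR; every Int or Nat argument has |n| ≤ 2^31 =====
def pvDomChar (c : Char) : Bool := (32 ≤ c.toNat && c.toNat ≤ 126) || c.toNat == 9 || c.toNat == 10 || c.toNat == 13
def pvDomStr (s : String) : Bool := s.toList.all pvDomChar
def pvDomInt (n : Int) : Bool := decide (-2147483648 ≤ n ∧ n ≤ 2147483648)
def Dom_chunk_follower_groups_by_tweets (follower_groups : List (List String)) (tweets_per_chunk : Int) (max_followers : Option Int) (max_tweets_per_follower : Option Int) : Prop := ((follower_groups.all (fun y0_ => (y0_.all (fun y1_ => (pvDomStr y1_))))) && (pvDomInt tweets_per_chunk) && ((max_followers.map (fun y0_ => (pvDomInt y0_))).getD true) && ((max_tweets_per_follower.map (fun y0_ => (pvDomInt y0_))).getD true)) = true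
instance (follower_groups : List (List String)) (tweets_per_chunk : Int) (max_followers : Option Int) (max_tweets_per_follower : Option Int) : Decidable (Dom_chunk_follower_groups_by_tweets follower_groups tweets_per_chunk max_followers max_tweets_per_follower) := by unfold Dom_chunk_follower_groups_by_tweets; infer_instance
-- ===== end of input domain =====

-- B replaces A's flat-list-then-range-slicing chunking by one streaming pass that fills and
-- flushes a 'current' chunk (objective: simpler). Equivalence is proved for chunk size ≥ 1.

-- ===== PORT A =====
def chunk_follower_groups_by_tweets (follower_groups : List (List String)) (tweets_per_chunk : Int) (max_followers : Option Int) (max_tweets_per_follower : Option Int) : List (List String) :=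
  let selected_followers := match max_followers with
    | some m => PySem.List.slice follower_groups none (some m)
    | none => follower_groups
  let flat_tweets := selected_followers.foldl (fun flat tweets =>
    let selected_tweets := match max_tweets_per_follower with
      | some m => PySem.List.slice tweets none (some m)
      | none => tweets
    let clean := selected_tweets.filter (fun t => PySem.Str.strip t != "")  -- isinstance(t, str) is always true
    flat ++ clean) []
  (PySem.List.pyRange 0 (flat_tweets.length : Int) tweets_per_chunk).foldl (fun chunks i =>
    let chunk := PySem.List.slice flat_tweets (some i) (some (i + tweets_per_chunk))
    if chunk ≠ [] then chunks ++ [chunk] else chunks) []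

-- ===== PORT B =====
def pvFlush (tweets_per_chunk : Int) (st : List (List String) × List String) (t : String) : List (List String) × List String :=
  let current := st.2 ++ [t]
  if (current.length : Int) = tweets_per_chunk then (st.1 ++ [current], []) else (st.1, current)

def chunk_follower_groups_by_tweets_alt (follower_groups : List (List String)) (tweets_per_chunk : Int) (max_followers : Option Int) (max_tweets_per_follower : Option Int) : List (List String) :=
  let selected_followers := match max_followers with
    | some m => PySem.List.slice follower_groups none (some m)
    | none => follower_groups
  let st : List (List String) × List String := selected_followers.foldl (fun st tweets =>
    let selected_tweets := match max_tweets_per_follower with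
      | some m => PySem.List.slice tweets none (some m)
      | none => tweets
    selected_tweets.foldl (fun st t =>
      if PySem.Str.strip t != "" then pvFlush tweets_per_chunk st t else st) st) (([], []) : List (List String) × List String)
  if st.2 ≠ [] then st.1 ++ [st.2] else st.1

-- ===== PRECONDITION & SPEC =====
-- Pre_ excludes non-positive chunk sizes: there A raises ValueError (zero, the range step)
-- or, for a negative size, returns no chunks at all because the range is backwards — a
-- degenerate corner whose value no caller would specify.
def Pre_chunk_follower_groups_by_tweets (follower_groups : List (List String)) (tweets_per_chunk : Int) (max_followers : Option Int) (max_tweets_per_follower : Option Int) : Prop := 1 ≤ tweets_per_chunk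
instance (follower_groups : List (List String)) (tweets_per_chunk : Int) (max_followers : Option Int) (max_tweets_per_follower : Option Int) : Decidable (Pre_chunk_follower_groups_by_tweets follower_groups tweets_per_chunk max_followers max_tweets_per_follower) := by unfold Pre_chunk_follower_groups_by_tweets; infer_instance

def pvWitness_chunk_follower_groups_by_tweets : List (List String) × Int × Option Int × Option Int := ([["a", "b", " "], ["c", "d", "e"]], 2, none, none)

def Spec_chunk_follower_groups_by_tweets (follower_groups : List (List String)) (tweets_per_chunk : Int) (max_followers : Option Int) (max_tweets_per_follower : Option Int) (out : List (List String)) : Prop := out = chunk_follower_groups_by_tweets_alt follower_groups tweets_per_chunk max_followers max_tweets_per_follower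
instance (follower_groups : List (List String)) (tweets_per_chunk : Int) (max_followers : Option Int) (max_tweets_per_follower : Option Int) (out : List (List String)) : Decidable (Spec_chunk_follower_groups_by_tweets follower_groups tweets_per_chunk max_followers max_tweets_per_follower out) := by unfold Spec_chunk_follower_groups_by_tweets; infer_instance

-- ===== CLAIM (what is proved, stated in full; the proofs are below) =====
def Claim_equal_chunk_follower_groups_by_tweets : Prop := ∀ (follower_groups : List (List String)) (tweets_per_chunk : Int) (max_followers : Option Int) (max_tweets_per_follower : Option Int), Dom_chunk_follower_groups_by_tweets follower_groups tweets_per_chunk max_followers max_tweets_per_follower → Pre_chunk_follower_groups_by_tweets follower_groups tweets_per_chunk max_followers max_tweets_per_follower → Spec_chunk_follower_groups_by_tweets follower_groups tweets_per_chunk max_followers max_tweets_per_follower (chunk_follower_groups_by_tweets follower_groups tweets_per_chunk max_followers max_tweets_per_follower)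

-- ===== LEMMAS AND PROOFS =====

-- the common specification: greedy chunks of size k (k ≥ 1)
def pvChunksOf (k : Int) : List String → List (List String)
  | [] => []
  | x :: t => (x :: t.take (k.toNat - 1)) :: pvChunksOf k (t.drop (k.toNat - 1))
termination_by l => l.length
decreasing_by simp [List.length_drop]

theorem pvChunksOf_cons (k : Int) (hk : 1 ≤ k) (F : List String) (h : F ≠ []) :
    pvChunksOf k F = F.take k.toNat :: pvChunksOf k (F.drop k.toNat) := by
  match F with
  | x :: t =>
    have h1 : k.toNat = (k.toNat - 1) + 1 := by omega
    rw [pvChunksOf.eq_2, h1, List.take_succ_cons, List.drop_succ_cons]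
    simp

theorem pvFlush_invariant (k : Int) (hk : 1 ≤ k) (L : List String) :
    ∀ (cs : List (List String)) (cur : List String), (cur.length : Int) < k →
    (let st := L.foldl (pvFlush k) (cs, cur);
     if st.2 ≠ [] then st.1 ++ [st.2] else st.1) = cs ++ pvChunksOf k (cur ++ L) := by
  induction L with
  | nil =>
    intro cs cur hcur
    simp only [List.foldl_nil, List.append_nil]
    by_cases h : cur = []
    · simp [h, pvChunksOf.eq_1]
    · have := pvChunksOf_cons k hk cur h
      rw [List.take_of_length_le (by omega), List.drop_eq_nil_of_le (by omega)] at this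
      simp [h, this, pvChunksOf.eq_1]
  | cons t rest ih =>
    intro cs cur hcur
    rw [List.foldl_cons]
    by_cases hfull : ((cur ++ [t]).length : Int) = k
    · have hfull' : (cur.length : Int) + 1 = k := by simpa using hfull
      have hstep : pvFlush k (cs, cur) t = (cs ++ [cur ++ [t]], []) := by
        simp [pvFlush, hfull']
      rw [hstep, ih (cs ++ [cur ++ [t]]) [] (by simpa using hk)]
      have hne : cur ++ t :: rest ≠ [] := by simp
      rw [pvChunksOf_cons k hk _ hne]
      have hlen : (cur ++ [t]).length = k.toNat := by omega
      have htake : (cur ++ t :: rest).take k.toNat = cur ++ [t] := by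
        rw [show cur ++ t :: rest = (cur ++ [t]) ++ rest by simp, List.take_append_of_le_length (by omega), List.take_of_length_le (by omega)]
      have hdrop : (cur ++ t :: rest).drop k.toNat = rest := by
        rw [show cur ++ t :: rest = (cur ++ [t]) ++ rest by simp, List.drop_append_of_le_length (by omega), List.drop_eq_nil_of_le (by omega), List.nil_append]
      rw [htake, hdrop]
      simp
    · have hfull' : ¬ ((cur.length : Int) + 1 = k) := by
        intro hc; exact hfull (by simpa using hc)
      have hstep : pvFlush k (cs, cur) t = (cs, cur ++ [t]) := by
        simp [pvFlush, hfull']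
      have hlt : ((cur ++ [t]).length : Int) < k := by
        simp only [List.length_append, List.length_cons, List.length_nil] at hfull ⊢
        push_cast at hfull ⊢
        omega
      rw [hstep, ih cs (cur ++ [t]) hlt]
      simp

-- range(0, n, k) with 0 < n, 0 < k starts at 0 and continues from k
theorem pyRange_pos_cons (b s : Int) (hs : 0 < s) (h : 0 < b) :
    PySem.List.pyRange 0 b s = 0 :: (PySem.List.pyRange 0 (b - s) s).map (fun i => s + i) := by
  rw [PySem.List.pyRange_of_pos _ _ hs, PySem.List.pyRange_of_pos _ _ hs]
  have hcount : (b - 0 + s - 1) / s = (b - 1) / s + 1 := by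
    rw [show b - 0 + s - 1 = (b - 1) + 1 * s by ring, Int.add_mul_ediv_right _ _ (by omega)]
  have hq : 0 ≤ (b - 1) / s := Int.ediv_nonneg (by omega) (by omega)
  have hm : (if (0:Int) < b then ((b - 0 + s - 1) / s).toNat else 0) = ((b - 1) / s).toNat + 1 := by
    rw [if_pos h, hcount]; omega
  rw [hm, List.range_succ_eq_map]
  simp only [List.map_cons, List.map_map]
  refine List.cons_eq_cons.mpr ⟨by simp, ?_⟩
  by_cases h2 : s < b
  · rw [if_pos (by omega), show b - s - 0 + s - 1 = b - 1 by ring]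
    apply List.map_congr_left
    intro a _
    simp only [Function.comp_apply]
    push_cast
    ring
  · have h0 : (b - 1) / s = 0 := Int.ediv_eq_zero_of_lt (by omega) (by omega)
    rw [if_neg (by omega), h0]
    simp

theorem afold_eq (k : Int) (hk : 1 ≤ k) : ∀ (n : Nat) (F : List String), F.length = n →
    ∀ (cs : List (List String)),
    (PySem.List.pyRange 0 (F.length : Int) k).foldl (fun chunks i =>
      let chunk := PySem.List.slice F (some i) (some (i + k));
      if chunk ≠ [] then chunks ++ [chunk] else chunks) cs = cs ++ pvChunksOf k F := by
  intro n
  induction n using Nat.strong_induction_on with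
  | _ n ih =>
    intro F hF cs
    match F with
    | [] => simp [PySem.List.pyRange_of_pos _ _ (by omega : (0:Int) < k), pvChunksOf.eq_1]
    | x :: t =>
      have hlen : (0:Int) < ((x :: t).length : Int) := by simp
      rw [pyRange_pos_cons _ k (by omega) hlen, List.foldl_cons, List.foldl_map]
      have hchunk0 : PySem.List.slice (x :: t) (some 0) (some (0 + k)) = (x :: t).take k.toNat := by
        rw [PySem.List.slice_toNat _ (by omega) (by omega)]
        simp
      have hne : (x :: t).take k.toNat ≠ [] := by
        simp [List.take_eq_nil_iff]; omega
      simp only [hchunk0, if_pos hne]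
      by_cases hkn : k ≤ ((x :: t).length : Int)
      · have hkn' : k ≤ (t.length : Int) + 1 := by simpa using hkn
        have hdl : (((x :: t).drop k.toNat).length : Int) = ((x :: t).length : Int) - k := by
          simp only [List.length_drop, List.length_cons]
          omega
        have hcongr := PySem.List.foldl_congr_mem
          (l := PySem.List.pyRange 0 (((x :: t).length : Int) - k) k)
          (f := fun acc i => if PySem.List.slice (x :: t) (some (k + i)) (some (k + i + k)) ≠ []
                 then acc ++ [PySem.List.slice (x :: t) (some (k + i)) (some (k + i + k))] else acc)
          (g := fun acc i => if PySem.List.slice ((x :: t).drop k.toNat) (some i) (some (i + k)) ≠ []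
                 then acc ++ [PySem.List.slice ((x :: t).drop k.toNat) (some i) (some (i + k))] else acc)
          (init := cs ++ [(x :: t).take k.toNat]) ?_
        · rw [hcongr, show ((x :: t).length : Int) - k = (((x :: t).drop k.toNat).length : Int) from hdl.symm]
          have hFn : t.length + 1 = n := by simpa using hF
          have hlt : ((x :: t).drop k.toNat).length < n := by
            simp only [List.length_drop, List.length_cons]
            omega
          rw [ih _ hlt ((x :: t).drop k.toNat) rfl]
          rw [show pvChunksOf k (x :: t) = (x :: t).take k.toNat :: pvChunksOf k ((x :: t).drop k.toNat) from pvChunksOf_cons k hk _ (by simp)]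
          simp
        · intro acc i hi
          have hi0 : 0 ≤ i := ((PySem.List.mem_pyRange_iff_of_pos (by omega) i).mp hi).1
          have hsl : PySem.List.slice (x :: t) (some (k + i)) (some (k + i + k)) =
                 PySem.List.slice ((x :: t).drop k.toNat) (some i) (some (i + k)) := by
            rw [PySem.List.slice_toNat _ (by omega) (by omega), PySem.List.slice_toNat _ (by omega) (by omega)]
            rw [List.drop_drop]
            congr 1
            · omega
            · congr 1; omega
          simp only [hsl]
      · have hempty : PySem.List.pyRange 0 (((x :: t).length : Int) - k) k = [] := by
          rw [PySem.List.pyRange_of_pos _ _ (by omega : (0:Int) < k), if_neg (by omega)]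
          simp
        rw [hempty]
        simp only [List.foldl_nil]
        rw [pvChunksOf_cons k hk _ (by simp)]
        have hdropnil : (x :: t).drop k.toNat = [] := List.drop_eq_nil_of_le (by omega)
        rw [hdropnil, pvChunksOf.eq_1]

theorem foldl_nested_eq (mt : Option Int) (k : Int) (S : List (List String)) (st0 : List (List String) × List String) :
    S.foldl (fun st tweets =>
      let selected_tweets := match mt with
        | some m => PySem.List.slice tweets none (some m)
        | none => tweets
      selected_tweets.foldl (fun st t =>
        if PySem.Str.strip t != "" then pvFlush k st t else st) st) st0 =
    (S.flatMap (fun tweets =>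
      let selected_tweets := match mt with
        | some m => PySem.List.slice tweets none (some m)
        | none => tweets
      selected_tweets.filter (fun t => PySem.Str.strip t != ""))).foldl (pvFlush k) st0 := by
  induction S generalizing st0 with
  | nil => simp
  | cons hd tl ih =>
    simp only [List.foldl_cons, List.flatMap_cons, List.foldl_append]
    rw [ih, List.foldl_filter]

theorem a_eq_b_on_flat (k : Int) (hk : 1 ≤ k) (F : List String) :
    (PySem.List.pyRange 0 (F.length : Int) k).foldl (fun chunks i =>
      let chunk := PySem.List.slice F (some i) (some (i + k));
      if chunk ≠ [] then chunks ++ [chunk] else chunks) [] =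
    (if (F.foldl (pvFlush k) ([], [])).2 ≠ []
     then (F.foldl (pvFlush k) ([], [])).1 ++ [(F.foldl (pvFlush k) ([], [])).2]
     else (F.foldl (pvFlush k) ([], [])).1) := by
  rw [afold_eq k hk F.length F rfl []]
  have h := pvFlush_invariant k hk F [] [] (by simpa using hk)
  simp only [List.nil_append] at h
  exact h.symm

-- ===== VERDICT (by name: the statement is the Claim_ definition above) =====
theorem chunk_follower_groups_by_tweets_spec : Claim_equal_chunk_follower_groups_by_tweets := by
  intro fg k mf mt _ hpre
  unfold Spec_chunk_follower_groups_by_tweets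
  unfold chunk_follower_groups_by_tweets chunk_follower_groups_by_tweets_alt
  have hk : 1 ≤ k := hpre
  simp only []
  rw [foldl_nested_eq]
  have hflat : ∀ (S : List (List String)),
      S.foldl (fun flat tweets =>
        let selected_tweets := match mt with
          | some m => PySem.List.slice tweets none (some m)
          | none => tweets
        let clean := selected_tweets.filter (fun t => PySem.Str.strip t != "")
        flat ++ clean) [] =
      S.flatMap (fun tweets =>
        let selected_tweets := match mt with
          | some m => PySem.List.slice tweets none (some m)
          | none => tweets
        selected_tweets.filter (fun t => PySem.Str.strip t != "")) := by
    intro S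
    simpa using PySem.List.foldl_append_eq_flatMap (l := S) (acc := []) _
  rw [hflat]
  exact a_eq_b_on_flat k hk _
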